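-- pv_equiv track=rewrite | github.com/bielborgesc/data-manipulation | data_manipulation.py | CompararArquivos
-- ===== SOURCE A (Python) =====
-- def PegarDados(mat, indice):  # Essa def vai pegar dados do arquivo
--     lista = []
--     for i in range(1, len(mat)):
--         lista.append(mat[i][indice])
--     return lista
--
-- def CompararArquivos(mat, mat2):  # Essa def vai comparar os dados
--     lista1 = PegarDados(mat2, 2)
--     listaAgrupada = []
--     for data in lista1:
--         for i in range(len(mat)):
--             if mat[i][2] == data:
--                 listaAgrupada.append(mat[i])
--     return listaAgrupada
-- ===== SOURCE B (Python) =====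
-- def CompararArquivos(mat, mat2):  # index mat rows by col-2 value once, then one lookup per data value
--     data = [row[2] for row in mat2[1:]]
--     if not data:
--         return []  # nothing to look up: skip building the index
--     groups = {}
--     for row in mat:
--         groups.setdefault(row[2], []).append(row)
--     out = []
--     for v in data:
--         out.extend(groups.get(v, []))
--     return out
-- ===== Notes on version B (the rewrite author's own statement) =====
-- stated objective: alternative
-- what changed: Replaces the nested scan (rescan all of mat for every mat2 data value) by a dict value->rows built once over mat plus one lookup per data value; no speed claimed since output size can dominate on duplicate-heavy inputs.
import Mathlib
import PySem

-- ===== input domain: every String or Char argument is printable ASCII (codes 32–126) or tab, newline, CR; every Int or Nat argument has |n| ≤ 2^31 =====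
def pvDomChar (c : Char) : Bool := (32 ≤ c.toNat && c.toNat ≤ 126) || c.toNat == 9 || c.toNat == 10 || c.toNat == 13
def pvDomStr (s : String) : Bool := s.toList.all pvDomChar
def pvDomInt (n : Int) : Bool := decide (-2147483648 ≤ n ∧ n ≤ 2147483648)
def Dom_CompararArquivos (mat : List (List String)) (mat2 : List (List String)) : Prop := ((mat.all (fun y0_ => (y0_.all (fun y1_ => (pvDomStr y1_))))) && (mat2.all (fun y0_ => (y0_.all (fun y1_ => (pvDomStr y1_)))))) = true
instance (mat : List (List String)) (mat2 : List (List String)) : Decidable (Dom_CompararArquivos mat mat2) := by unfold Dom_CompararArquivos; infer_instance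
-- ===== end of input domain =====

-- B collects mat2's data values, then (only if any) groups mat rows by col-2 in a dict built once and looks each value up (objective: alternative).

-- ===== PORT A =====
def PegarDados (mat : List (List String)) (indice : Int) : List String :=
  (PySem.List.pyRange 1 mat.length 1).foldl
    (fun lista i => lista ++ [PySem.List.pyGetD (PySem.List.pyGetD mat i []) indice ""]) []

def CompararArquivos (mat : List (List String)) (mat2 : List (List String)) : List (List String) :=
  let lista1 := PegarDados mat2 2
  lista1.foldl
    (fun listaAgrupada data =>
      (PySem.List.pyRange 0 mat.length 1).foldl
        (fun acc i =>
          if PySem.List.pyGetD (PySem.List.pyGetD mat i []) 2 "" == data then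
            acc ++ [PySem.List.pyGetD mat i []]
          else acc)
        listaAgrupada)
    []

-- ===== PORT B =====
-- groups.setdefault(row[2], []).append(row)  ==  groups[row[2]] = groups.get(row[2], []) + [row]  == Dict.modify (exact here)
def CompararArquivos_alt (mat : List (List String)) (mat2 : List (List String)) : List (List String) :=
  let data := (PySem.List.slice mat2 (some 1) none).map (fun row => PySem.List.pyGetD row 2 "")
  if data = [] then []
  else
    let groups : PySem.Dict String (List (List String)) :=
      mat.foldl (fun d row => d.modify (PySem.List.pyGetD row 2 "") [] (· ++ [row])) PySem.Dict.empty
    data.foldl (fun out v => out ++ groups.getD v []) []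

-- ===== PRECONDITION & SPEC =====
-- Pre_ excludes exactly the inputs where A raises IndexError: a data row of mat2 shorter than 3
-- (mat2[i][2]), or — when mat2 has at least one data row — a mat row shorter than 3 (mat[i][2]).
def Pre_CompararArquivos (mat : List (List String)) (mat2 : List (List String)) : Prop :=
  (∀ r ∈ mat2.drop 1, 3 ≤ r.length) ∧ (1 < mat2.length → ∀ r ∈ mat, 3 ≤ r.length)
instance (mat : List (List String)) (mat2 : List (List String)) : Decidable (Pre_CompararArquivos mat mat2) := by unfold Pre_CompararArquivos; infer_instance

def pvWitness_CompararArquivos : List (List String) × List (List String) :=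
  ([["x", "y", "v1"], ["a", "b", "v2"]], [["h", "h", "h"], ["p", "q", "v1"]])

def Spec_CompararArquivos (mat : List (List String)) (mat2 : List (List String)) (out : List (List String)) : Prop := out = CompararArquivos_alt mat mat2
instance (mat : List (List String)) (mat2 : List (List String)) (out : List (List String)) : Decidable (Spec_CompararArquivos mat mat2 out) := by unfold Spec_CompararArquivos; infer_instance

-- ===== CLAIM (what is proved, stated in full; the proofs are below) =====
def Claim_equal_CompararArquivos : Prop := ∀ (mat : List (List String)) (mat2 : List (List String)), Dom_CompararArquivos mat mat2 → Pre_CompararArquivos mat mat2 → Spec_CompararArquivos mat mat2 (CompararArquivos mat mat2)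

-- ===== LEMMAS AND PROOFS =====

-- A's helper returns the column-`indice` values of mat's rows 1..  (here we only need indice = 2).
theorem PegarDados_eq_map (mat : List (List String)) (indice : Int) :
    PegarDados mat indice = (mat.drop 1).map (fun r => PySem.List.pyGetD r indice "") := by
  unfold PegarDados
  rw [PySem.List.foldl_append_singleton_eq_map, List.nil_append]
  have h := PySem.List.map_pyGetD_pyRange (xs := mat) (a := 1) (d := ([] : List String)) (by norm_num)
  rw [show ((1 : Int)).toNat = 1 from rfl] at h
  rw [← h, List.map_map]
  rfl

-- A = the data values of mat2, each expanded to the mat rows matching it, in mat order.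
theorem CompararArquivos_eq_flatMap (mat mat2 : List (List String)) :
    CompararArquivos mat mat2 =
      ((mat2.drop 1).map (fun row => PySem.List.pyGetD row 2 "")).flatMap
        (fun v => mat.filter (fun r => PySem.List.pyGetD r 2 "" == v)) := by
  simp only [CompararArquivos, PegarDados_eq_map]
  refine Eq.trans (PySem.List.foldl_congr_mem _ _
      (fun acc data => acc ++ mat.filter (fun r => PySem.List.pyGetD r 2 "" == data)) []
      ?_) ?_
  · intro acc data _
    rw [PySem.List.foldl_pyRange_zero_pyGetD' mat []
          (fun acc r => if PySem.List.pyGetD r 2 "" == data then acc ++ [r] else acc) acc]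
    exact PySem.List.foldl_append_if_eq_filter _ mat acc
  · rw [PySem.List.foldl_append_eq_flatMap]
    rw [List.nil_append]

-- B's dict, looked up at v, is exactly the mat rows whose column 2 is v, in mat order.
theorem groups_getD (mat : List (List String)) (v : String) :
    (mat.foldl (fun d row => d.modify (PySem.List.pyGetD row 2 "") [] (· ++ [row]))
        (PySem.Dict.empty : PySem.Dict String (List (List String)))).getD v []
      = mat.filter (fun r => PySem.List.pyGetD r 2 "" == v) := by
  have h := List.foldl_map (f := fun r : List String => (PySem.List.pyGetD r 2 "", r))
      (g := fun (d : PySem.Dict String (List (List String))) (p : String × List String) =>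
        d.modify p.1 [] (· ++ [p.2])) (l := mat) (init := PySem.Dict.empty)
  beta_reduce at h
  rw [← h, PySem.Dict.getD_foldl_modify_append]
  simp [List.filter_map, Function.comp_def]

theorem CompararArquivos_alt_eq_flatMap (mat mat2 : List (List String)) :
    CompararArquivos_alt mat mat2 =
      ((mat2.drop 1).map (fun row => PySem.List.pyGetD row 2 "")).flatMap
        (fun v => mat.filter (fun r => PySem.List.pyGetD r 2 "" == v)) := by
  simp only [CompararArquivos_alt, PySem.List.slice_from_one]
  rw [List.drop_one]
  split_ifs with h
  · rw [h]; rfl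
  · rw [PySem.List.foldl_append_eq_flatMap, List.nil_append]
    exact List.flatMap_congr (fun v _ => groups_getD mat v)

-- ===== VERDICT (by name: the statement is the Claim_ definition above) =====
theorem CompararArquivos_spec : Claim_equal_CompararArquivos := by
  intro mat mat2 _ _
  unfold Spec_CompararArquivos
  rw [CompararArquivos_eq_flatMap, CompararArquivos_alt_eq_flatMap]
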